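-- pv_equiv track=rewrite | github.com/soyjubilado/AdventOfCode | 2022/prog202224.py | GridMinMax
-- ===== SOURCE A (Python) =====
-- def GridMinMax(grid):
--   """Minimum and maximum grid coordinates, for printing."""
--   x_all = [x for x, y in grid]
--   y_all = [y for x, y in grid]
--   min_x = min(x_all)
--   min_y = min(y_all)
--   max_x = max(x_all)
--   max_y = max(y_all)
--   return min_x, min_y, max_x, max_y
-- ===== SOURCE B (Python) =====
-- def GridMinMax(grid):
--   """Minimum and maximum grid coordinates, for printing."""
--   it = iter(grid)
--   try:
--     x, y = next(it)
--   except StopIteration: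
--     raise ValueError("GridMinMax() arg is an empty grid")
--   min_x = max_x = x
--   min_y = max_y = y
--   for x, y in it:
--     if x < min_x: min_x = x
--     if x > max_x: max_x = x
--     if y < min_y: min_y = y
--     if y > max_y: max_y = y
--   return min_x, min_y, max_x, max_y
-- ===== Notes on version B (the rewrite author's own statement) =====
-- stated objective: simpler
-- what changed: Replaces the two intermediate coordinate lists and four separate min/max scans with a single pass over the grid that seeds all four extremes from the first point and updates them with comparisons.
import Mathlib
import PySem

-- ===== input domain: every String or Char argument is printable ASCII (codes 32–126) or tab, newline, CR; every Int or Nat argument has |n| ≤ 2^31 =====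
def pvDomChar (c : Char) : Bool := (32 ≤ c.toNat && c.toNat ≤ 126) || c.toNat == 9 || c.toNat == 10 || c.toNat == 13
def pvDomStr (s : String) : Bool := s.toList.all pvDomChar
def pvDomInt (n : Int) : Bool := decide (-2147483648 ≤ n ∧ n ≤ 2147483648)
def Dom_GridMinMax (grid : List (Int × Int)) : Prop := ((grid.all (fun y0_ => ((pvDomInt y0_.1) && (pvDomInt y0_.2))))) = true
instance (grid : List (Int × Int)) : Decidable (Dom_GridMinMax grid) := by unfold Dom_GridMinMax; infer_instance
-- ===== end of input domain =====

-- B fuses A's two temporary lists and four min/max scans into one pass seeded from the first point (objective: simpler).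
-- Pre_ excludes the empty grid, on which both Pythons raise ValueError.


-- ===== PORT A =====
-- min()/max() on a nonempty list via PySem.List.min?/max?; the .getD 0 default is never reached under Pre_ (Python raises ValueError on []).
def GridMinMax (grid : List (Int × Int)) : Int × Int × Int × Int :=
  let x_all := grid.map (fun p => p.1)
  let y_all := grid.map (fun p => p.2)
  let min_x := (PySem.List.min? x_all (fun v => v)).getD 0
  let min_y := (PySem.List.min? y_all (fun v => v)).getD 0
  let max_x := (PySem.List.max? x_all (fun v => v)).getD 0
  let max_y := (PySem.List.max? y_all (fun v => v)).getD 0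
  (min_x, min_y, max_x, max_y)

-- ===== PORT B =====
def gmmStep (s : Int × Int × Int × Int) (p : Int × Int) : Int × Int × Int × Int :=
  let s := if p.1 < s.1 then (p.1, s.2.1, s.2.2.1, s.2.2.2) else s
  let s := if p.1 > s.2.2.1 then (s.1, s.2.1, p.1, s.2.2.2) else s
  let s := if p.2 < s.2.1 then (s.1, p.2, s.2.2.1, s.2.2.2) else s
  if p.2 > s.2.2.2 then (s.1, s.2.1, s.2.2.1, p.2) else s

-- one fold over the tail, state = (min_x, min_y, max_x, max_y) seeded from the first point;
-- the [] case corresponds to Source B's raise ValueError and is excluded by Pre_.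
def GridMinMax_alt (grid : List (Int × Int)) : Int × Int × Int × Int :=
  match grid with
  | [] => (0, 0, 0, 0)
  | (x, y) :: rest =>
    rest.foldl gmmStep (x, y, x, y)

-- ===== PRECONDITION & SPEC =====
-- Pre_ excludes only the empty grid, on which A's min([]) raises ValueError (and B also raises).
def Pre_GridMinMax (grid : List (Int × Int)) : Prop := grid ≠ []
instance (grid : List (Int × Int)) : Decidable (Pre_GridMinMax grid) := by unfold Pre_GridMinMax; infer_instance
def pvWitness_GridMinMax : (List (Int × Int)) := [(3, -1), (0, 5)]
def Spec_GridMinMax (grid : List (Int × Int)) (out : Int × Int × Int × Int) : Prop := out = GridMinMax_alt grid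
instance (grid : List (Int × Int)) (out : Int × Int × Int × Int) : Decidable (Spec_GridMinMax grid out) := by unfold Spec_GridMinMax; infer_instance

-- ===== CLAIM =====
def Claim_equal_GridMinMax : Prop := ∀ (grid : List (Int × Int)), Dom_GridMinMax grid → Pre_GridMinMax grid → Spec_GridMinMax grid (GridMinMax grid)

-- ===== LEMMAS AND PROOFS =====

theorem gmmStep_eq (a b c d : Int) (p : Int × Int) :
    gmmStep (a, b, c, d) p = (min a p.1, min b p.2, max c p.1, max d p.2) := by
  obtain ⟨u, v⟩ := p
  unfold gmmStep
  dsimp only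
  split_ifs <;> simp_all [min_def, max_def] <;> omega

theorem gmm_fold (rest : List (Int × Int)) : ∀ (a b c d : Int),
    rest.foldl gmmStep (a, b, c, d)
    = ((rest.map (fun p => p.1)).foldl min a,
       (rest.map (fun p => p.2)).foldl min b,
       (rest.map (fun p => p.1)).foldl max c,
       (rest.map (fun p => p.2)).foldl max d) := by
  induction rest with
  | nil => intro a b c d; simp
  | cons hd tl ih =>
    intro a b c d
    simp only [List.foldl_cons, List.map_cons, gmmStep_eq]
    exact ih _ _ _ _

-- ===== VERDICT =====
theorem GridMinMax_spec : Claim_equal_GridMinMax := by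
  intro grid _ hpre
  unfold Spec_GridMinMax GridMinMax GridMinMax_alt
  match grid with
  | [] => exact absurd rfl hpre
  | (x, y) :: rest =>
    simp only [List.map_cons, PySem.List.min?_id_cons, PySem.List.max?_id_cons, Option.getD_some]
    rw [gmm_fold]
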